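-- pv_equiv track=rewrite | github.com/alby69/py2c64 | main.py | _apply_peephole_optimizations
-- ===== SOURCE A (Python) =====
-- def _apply_peephole_optimizations(code_list):
--     """
--     Applies peephole optimizations to the generated assembly code.
--     Currently implements:
--     1. Removal of redundant JMP instructions where the target label is the very next line.
--     """
--     optimized_code = []
--     i = 0
--     while i < len(code_list):
--         line = code_list[i].strip()
--
--         # Optimization 1: Remove JMP to the very next instruction
--         # Pattern:
--         # JMP label
--         # label:
--         if line.startswith("JMP ") and i + 1 < len(code_list):
--             target_label = line[4:].strip()
--             if code_list[i+1].strip().startswith(target_label + ":"):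
--                 i += 1 # Skip the JMP instruction, the label will be added in the next iteration
--                 continue # Continue to process the label line
--         optimized_code.append(code_list[i])
--         i += 1
--     return optimized_code
-- ===== SOURCE B (Python) =====
-- def _apply_peephole_optimizations(code_list):
--     """Backward single pass: walk the code from the last line to the first,
--     carrying the previously visited line (= the successor) as lookbehind state,
--     drop a JMP whose target label starts that successor, then reverse."""
--     out = []
--     nxt = None
--     for line in reversed(code_list):
--         stripped = line.strip()
--         redundant = (nxt is not None
--                      and stripped.startswith("JMP ")
--                      and nxt.strip().startswith(stripped[4:].strip() + ":"))
--         if not redundant: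
--             out.append(line)
--         nxt = line
--     out.reverse()
--     return out
-- ===== Notes on version B (the rewrite author's own statement) =====
-- stated objective: alternative
-- what changed: A's forward index-based while-loop with skip-and-continue is replaced by a backward single pass over reversed(code_list) that carries the successor line as a one-element lookbehind state (no indexing, no lookahead), appending kept lines and reversing the result at the end.
import Mathlib
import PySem

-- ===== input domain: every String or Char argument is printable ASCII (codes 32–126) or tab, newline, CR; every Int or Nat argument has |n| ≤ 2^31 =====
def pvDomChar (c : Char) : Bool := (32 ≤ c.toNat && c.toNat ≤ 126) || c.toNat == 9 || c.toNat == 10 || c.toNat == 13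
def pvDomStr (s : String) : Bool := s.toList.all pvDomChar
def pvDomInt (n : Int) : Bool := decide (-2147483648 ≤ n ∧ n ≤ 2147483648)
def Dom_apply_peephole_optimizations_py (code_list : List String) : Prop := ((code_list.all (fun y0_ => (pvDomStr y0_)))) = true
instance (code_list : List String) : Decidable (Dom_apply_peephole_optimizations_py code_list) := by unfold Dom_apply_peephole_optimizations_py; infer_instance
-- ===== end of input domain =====

-- Re-implementation B: A's forward index-based skip-and-continue while-loop is replaced by a
-- backward pass over the reversed list carrying the successor line as lookbehind state (alternative decomposition).


-- ===== PORT A =====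
-- while-loop of A as index recursion; code_list[i+1] is read with getD "" — in range by the
-- boolean guard `i + 1 < len` that precedes it, exactly as in the Python.
def pvA_loop (code_list : List String) (i : Nat) (acc : List String) : List String :=
  if h : i < code_list.length then
    let line := PySem.Str.strip code_list[i]
    if PySem.Str.startswith line "JMP " && decide (i + 1 < code_list.length) then
      let target_label := PySem.Str.strip (PySem.Str.slice line (some 4) none)
      if PySem.Str.startswith (PySem.Str.strip (code_list.getD (i + 1) "")) (target_label ++ ":") then
        pvA_loop code_list (i + 1) acc          -- skip the JMP line
      else
        pvA_loop code_list (i + 1) (acc ++ [code_list[i]])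
    else
      pvA_loop code_list (i + 1) (acc ++ [code_list[i]])
  else acc
termination_by code_list.length - i

def apply_peephole_optimizations_py (code_list : List String) : List String :=
  pvA_loop code_list 0 []

-- ===== PORT B =====
-- one step of Source B's backward loop: state = (out so far, the previously visited line = successor)
def pvB_step (st : List String × Option String) (line : String) : List String × Option String :=
  let stripped := PySem.Str.strip line
  let redundant :=
    match st.2 with
    | none => false
    | some nxt =>
        PySem.Str.startswith stripped "JMP " &&
          PySem.Str.startswith (PySem.Str.strip nxt)
            (PySem.Str.strip (PySem.Str.slice stripped (some 4) none) ++ ":")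
  ((if redundant then st.1 else st.1 ++ [line]), some line)

def apply_peephole_optimizations_py_alt (code_list : List String) : List String :=
  (code_list.reverse.foldl pvB_step ([], none)).1.reverse

-- ===== PRECONDITION & SPEC =====
def Spec_apply_peephole_optimizations_py (code_list : List String) (out : List String) : Prop := out = apply_peephole_optimizations_py_alt code_list
instance (code_list : List String) (out : List String) : Decidable (Spec_apply_peephole_optimizations_py code_list out) := by unfold Spec_apply_peephole_optimizations_py; infer_instance

-- ===== CLAIM (what is proved, stated in full; the proofs are below) =====
def Claim_equal_apply_peephole_optimizations_py : Prop := ∀ (code_list : List String), Dom_apply_peephole_optimizations_py code_list → Spec_apply_peephole_optimizations_py code_list (apply_peephole_optimizations_py code_list)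

-- ===== LEMMAS AND PROOFS =====

-- the redundancy test on a line x with successor y (the common middle form)
def pvCond2 (x y : String) : Bool :=
  let s := PySem.Str.strip x
  PySem.Str.startswith s "JMP " &&
    PySem.Str.startswith (PySem.Str.strip y)
      (PySem.Str.strip (PySem.Str.slice s (some 4) none) ++ ":")

-- reference recursion: keep x unless its successor (head of the tail) makes it redundant
def pvG : List String → List String
  | [] => []
  | x :: t =>
      (if (match t.head? with | none => false | some y => pvCond2 x y) then [] else [x]) ++ pvG t

-- pvB_step expressed through pvCond2 (definitional)
lemma pvB_step_eq (st : List String × Option String) (line : String) :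
    pvB_step st line =
      ((if (match st.2 with | none => false | some y => pvCond2 line y) then st.1
        else st.1 ++ [line]), some line) := rfl

-- B's fold in closed form
lemma pvB_fold (l : List String) (acc : List String) :
    l.reverse.foldl pvB_step (acc, none) = (acc ++ (pvG l).reverse, l.head?) := by
  induction l generalizing acc with
  | nil => simp [pvG]
  | cons x t ih =>
      rw [List.reverse_cons, List.foldl_append, ih, List.foldl_cons, List.foldl_nil,
        pvB_step_eq]
      cases ht : t.head? with
      | none => simp [pvG, ht]
      | some y => cases hc : pvCond2 x y <;> simp [pvG, ht, hc]

-- A's loop in closed form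
lemma pvA_loop_eq (code_list : List String) (i : Nat) (acc : List String) :
    pvA_loop code_list i acc = acc ++ pvG (code_list.drop i) := by
  by_cases h : i < code_list.length
  · have hdrop : code_list.drop i = code_list[i] :: code_list.drop (i + 1) :=
      List.drop_eq_getElem_cons h
    rw [pvA_loop]
    simp only [dif_pos h]
    by_cases h2 : i + 1 < code_list.length
    · have hhead : (code_list.drop (i + 1)).head? = some code_list[i + 1] := by
        rw [List.head?_drop]
        exact List.getElem?_eq_getElem h2
      have hgetD : code_list.getD (i + 1) "" = code_list[i + 1] :=
        List.getD_eq_getElem _ _ h2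
      rw [hdrop]
      simp only [pvG, hhead, hgetD, decide_eq_true h2, Bool.and_true, pvCond2]
      cases hs : PySem.Str.startswith (PySem.Str.strip code_list[i]) "JMP " with
      | true =>
          cases hl : PySem.Str.startswith (PySem.Str.strip code_list[i + 1])
              (PySem.Str.strip (PySem.Str.slice (PySem.Str.strip code_list[i]) (some 4) none) ++ ":") with
          | true =>
              rw [pvA_loop_eq code_list (i + 1) acc]
              simp
          | false =>
              rw [pvA_loop_eq code_list (i + 1) (acc ++ [code_list[i]])]
              simp
      | false =>
          rw [pvA_loop_eq code_list (i + 1) (acc ++ [code_list[i]])]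
          simp
    · have hdropnil : code_list.drop (i + 1) = [] := List.drop_eq_nil_of_le (by omega)
      rw [pvA_loop_eq code_list (i + 1) (acc ++ [code_list[i]])] at *
      rw [hdrop, hdropnil]
      simp [pvG, h2]
  · have : code_list.drop i = [] := List.drop_eq_nil_of_le (by omega)
    rw [pvA_loop]
    simp [h, this, pvG]
termination_by code_list.length - i

-- ===== VERDICT (by name: the statement is the Claim_ definition above) =====
theorem apply_peephole_optimizations_py_spec : Claim_equal_apply_peephole_optimizations_py := by
  intro code_list _
  unfold Spec_apply_peephole_optimizations_py apply_peephole_optimizations_py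
    apply_peephole_optimizations_py_alt
  rw [pvB_fold, pvA_loop_eq]
  simp
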